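-- pv_equiv track=rewrite | github.com/Voskan/Apex-X | apex_x/data/coco.py | _decode_compressed_rle_counts
-- ===== SOURCE A (Python) =====
-- def _decode_compressed_rle_counts(encoded_counts: str) -> tuple[int, ...]:
--     if encoded_counts == "":
--         raise ValueError("compressed RLE counts must not be empty")
--
--     counts: list[int] = []
--     position = 0
--     encoded = encoded_counts.encode("ascii")
--     while position < len(encoded):
--         value = 0
--         shift = 0
--         continuation = True
--         sign_bit = 0
--         while continuation:
--             if position >= len(encoded):
--                 raise ValueError("invalid compressed RLE encoding")
--             current = int(encoded[position]) - 48
--             if current < 0: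
--                 raise ValueError("compressed RLE contains invalid characters")
--             position += 1
--             continuation = (current & 0x20) != 0
--             value |= (current & 0x1F) << (5 * shift)
--             sign_bit = current & 0x10
--             shift += 1
--
--         if sign_bit != 0:
--             value |= -1 << (5 * shift)
--         if len(counts) > 1:
--             value += counts[-2]
--         if value < 0:
--             raise ValueError("decoded RLE counts must be non-negative")
--         counts.append(value)
--
--     return tuple(int(v) for v in counts)
-- ===== SOURCE B (Python) =====
-- def _decode_compressed_rle_counts(encoded_counts: str) -> tuple[int, ...]:
--     if encoded_counts == "":
--         raise ValueError("compressed RLE counts must not be empty")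
--
--     # Pass 1: char codes relative to '0'; reject anything below '0' up front.
--     codes = [ord(c) - 48 for c in encoded_counts]
--     if min(codes) < 0:
--         raise ValueError("compressed RLE contains invalid characters")
--
--     # Pass 2: split into varint groups; a group ends at a char whose
--     # continuation bit (value 32 of the 6-bit code) is clear.
--     groups: list[list[int]] = []
--     start = 0
--     for i, code in enumerate(codes):
--         if code % 64 < 32:
--             groups.append(codes[start:i + 1])
--             start = i + 1
--     if start != len(codes):
--         raise ValueError("invalid compressed RLE encoding")
--
--     # Pass 3: each group is a little-endian base-32 numeral; re-spell it as a
--     # big-endian base-32 string and let int(s, 32) do the conversion, then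
--     # apply two's-complement sign from the top digit's bit 4.
--     digits = "0123456789abcdefghijklmnopqrstuv"
--     raws: list[int] = []
--     for g in groups:
--         magnitude = int("".join(digits[c % 32] for c in reversed(g)), 32)
--         if g[-1] % 32 >= 16:
--             magnitude -= 32 ** len(g)
--         raws.append(magnitude)
--
--     # Pass 4: lag-2 delta decoding with the non-negativity check.
--     counts: list[int] = []
--     for v in raws:
--         if len(counts) > 1:
--             v += counts[-2]
--         if v < 0:
--             raise ValueError("decoded RLE counts must be non-negative")
--         counts.append(v)
--     return tuple(counts)
-- ===== Notes on version B (the rewrite author's own statement) =====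
-- stated objective: alternative
-- what changed: A's single interleaved loop with bitwise accumulation is replaced by four staged passes: validate all characters, split the string into varint groups by slicing, decode each group by re-spelling it as a big-endian base-32 string fed to int(s, 32) with a two's-complement sign fix, then a final lag-2 delta pass.
import Mathlib
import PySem

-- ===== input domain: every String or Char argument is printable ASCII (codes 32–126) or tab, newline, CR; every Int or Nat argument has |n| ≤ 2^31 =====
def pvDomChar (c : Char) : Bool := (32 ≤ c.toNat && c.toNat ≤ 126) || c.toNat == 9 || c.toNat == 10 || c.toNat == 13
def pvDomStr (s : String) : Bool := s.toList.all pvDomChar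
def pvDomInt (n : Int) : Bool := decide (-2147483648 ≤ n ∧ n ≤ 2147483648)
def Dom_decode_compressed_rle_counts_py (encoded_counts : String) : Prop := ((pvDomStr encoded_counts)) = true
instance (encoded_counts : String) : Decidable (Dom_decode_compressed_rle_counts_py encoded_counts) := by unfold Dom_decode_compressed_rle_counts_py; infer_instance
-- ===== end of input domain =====

-- B replaces A's single interleaved bit-twiddling loop by four staged passes
-- (validate chars, split into groups, decode each group through a big-endian
-- base-32 string fed to int(s,32), lag-2 delta pass); same return value
-- wherever A returns (objective: alternative).

-- ===== PORT A =====
-- Inner `while continuation` loop of A: consumes one varint from the char list.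
-- Returns (value, shift, sign_bit, remaining chars); `none` = ValueError.
def aInner : List Char → Nat → Nat → Option (Nat × Nat × Nat × List Char)
  | [], _, _ => none  -- "invalid compressed RLE encoding"
  | c :: rest, value, shift =>
    let current : Int := (c.toNat : Int) - 48
    if current < 0 then none  -- "compressed RLE contains invalid characters"
    else
      let cur := current.toNat
      let continuation := cur &&& 0x20 != 0
      let value := value ||| ((cur &&& 0x1F) <<< (5 * shift))
      let sign_bit := cur &&& 0x10
      if continuation then aInner rest value (shift + 1)
      else some (value, shift + 1, sign_bit, rest)

-- Needed by aLoop's termination (A's outer while loop advances `position`).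
theorem aInner_length_lt : ∀ (l : List Char) (v sh : Nat) (out : Nat × Nat × Nat × List Char),
    aInner l v sh = some out → out.2.2.2.length < l.length := by
  intro l
  induction l with
  | nil => intro v sh out h; simp [aInner] at h
  | cons c rest ih =>
    intro v sh out h
    simp only [aInner] at h
    split at h
    · exact absurd h (by simp)
    · split at h
      · have := ih _ _ _ h; simpa using Nat.lt_trans this (Nat.lt_succ_self _)
      · cases h; simpa using Nat.lt_succ_self _

-- Outer `while position < len(encoded)` loop of A, carrying the counts list.
-- `value |= -1 << (5*shift)` is rendered as subtracting 2^(5*shift): exact, because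
-- at that point 0 ≤ value < 2^(5*shift), so the OR is two's-complement sign extension.
def aLoop (l : List Char) (counts : List Int) : Option (List Int) :=
  if _hl : l = [] then some counts
  else
    match h : aInner l 0 0 with
    | none => none
    | some (v, shift, sign, rest) =>
      let value : Int := if sign ≠ 0 then (v : Int) - 2 ^ (5 * shift) else (v : Int)
      let value2 : Int :=
        if counts.length > 1 then value + (PySem.List.pyGet? counts (-2)).getD 0 else value
      if value2 < 0 then none  -- "decoded RLE counts must be non-negative"
      else aLoop rest (counts ++ [value2])
termination_by l.length
decreasing_by exact aInner_length_lt _ _ _ _ h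

def decode_compressed_rle_counts_py (encoded_counts : String) : List Int :=
  if encoded_counts = "" then []  -- ValueError (empty input); excluded by Pre_
  else (aLoop encoded_counts.toList []).getD []  -- none = ValueError; excluded by Pre_

-- ===== PORT B =====
-- B pass 2: split the code list into groups, each ending at a code with the
-- continuation bit (value 32) clear; `acc` is the pending group (Python keeps
-- the same pending run as the slice codes[start:i+1]); `none` = ValueError.
def bSplit : List Nat → List Nat → Option (List (List Nat))
  | [], acc => if acc.isEmpty then some [] else none  -- start != len(codes)
  | c :: rest, acc =>
    if c % 64 < 32 then (bSplit rest []).map (fun gs => (acc ++ [c]) :: gs)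
    else bSplit rest (acc ++ [c])

-- B pass 3 helpers: the digit table and a hand port of Python's int(s, 32)
-- (Horner over the chars; exact for the digit chars B itself produces).
def pvDigitsB : List Char := "0123456789abcdefghijklmnopqrstuv".toList
def pvDigitVal (c : Char) : Nat := if c.toNat ≤ 57 then c.toNat - 48 else c.toNat - 87
def pvParse32 (l : List Char) : Nat := l.foldl (fun a c => a * 32 + pvDigitVal c) 0

-- decode one group: big-endian base-32 string of its reversed digits, then the
-- two's-complement sign fix from the top digit's bit 4 (index c % 32 < 32, so
-- the getD default is never used; groups are non-empty, so getLastD is g[-1]).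
def bDecodeGroup (g : List Nat) : Int :=
  let magnitude : Int := pvParse32 (g.reverse.map (fun c => pvDigitsB.getD (c % 32) '0'))
  if g.getLastD 0 % 32 ≥ 16 then magnitude - (32 : Int) ^ g.length else magnitude

-- B pass 4: lag-2 delta and non-negativity check over the raw values.
def bConsume : List Int → List Int → Option (List Int)
  | [], counts => some counts
  | v :: vs, counts =>
    let value : Int :=
      if counts.length > 1 then v + (PySem.List.pyGet? counts (-2)).getD 0 else v
    if value < 0 then none  -- non-negativity violation
    else bConsume vs (counts ++ [value])

-- B pass 1 (`min(codes) < 0`) is the `any (< '0')` test; codes are then exact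
-- Nat subtractions because every remaining char is ≥ '0'.
def decode_compressed_rle_counts_py_alt (encoded_counts : String) : List Int :=
  if encoded_counts = "" then []  -- ValueError (empty input); excluded by Pre_
  else if encoded_counts.toList.any (fun c => c.toNat < 48) then []  -- ValueError (invalid characters)
  else
    let codes := encoded_counts.toList.map (fun c => c.toNat - 48)
    (((bSplit codes []).bind
        (fun gs => bConsume (gs.map bDecodeGroup) []))).getD []  -- none = ValueError

-- ===== PRECONDITION & SPEC =====
-- Declarative helpers describing a valid encoding (used only by Pre_, not by the ports).
def pvCont (c : Char) : Bool := 80 ≤ c.toNat && c.toNat ≤ 111  -- continuation-bit chars 'P'..'o'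
def pvGroups : List Char → List (List Char)  -- split after each non-continuation char
  | [] => []
  | c :: rest =>
    if pvCont c then
      match pvGroups rest with
      | [] => [[c]]
      | g :: gs => (c :: g) :: gs
    else [c] :: pvGroups rest
def pvGroupVal : List Char → Nat → Int  -- signed value of one base-32 varint group
  | [], _ => 0
  | [c], sh =>
    ((c.toNat - 48) % 32 : Nat) * (32 : Int) ^ sh +
      (if (c.toNat - 48) % 32 ≥ 16 then -((32 : Int) ^ (sh + 1)) else 0)
  | c :: c' :: rest, sh =>
    ((c.toNat - 48) % 32 : Nat) * (32 : Int) ^ sh + pvGroupVal (c' :: rest) (sh + 1)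
def pvOk : Int → Int → List Int → Bool  -- all lag-2 delta-decoded counts non-negative
  | _, _, [] => true
  | p2, p1, v :: rest => decide (0 ≤ v + p2) && pvOk p1 (v + p2) rest

-- Pre_ = exactly the inputs where the Python A returns (raises no ValueError):
-- non-empty, every char code ≥ 48, the last char has no continuation bit, and
-- every lag-2 delta-decoded count is non-negative.
def Pre_decode_compressed_rle_counts_py (encoded_counts : String) : Prop :=
  encoded_counts ≠ "" ∧
  (encoded_counts.toList.all (fun c => 48 ≤ c.toNat)) = true ∧
  pvCont (encoded_counts.toList.getLastD '0') = false ∧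
  pvOk 0 0 ((pvGroups encoded_counts.toList).map (fun g => pvGroupVal g 0)) = true
instance (encoded_counts : String) : Decidable (Pre_decode_compressed_rle_counts_py encoded_counts) := by
  unfold Pre_decode_compressed_rle_counts_py; infer_instance

def pvWitness_decode_compressed_rle_counts_py : String := "0"

def Spec_decode_compressed_rle_counts_py (encoded_counts : String) (out : List Int) : Prop := out = decode_compressed_rle_counts_py_alt encoded_counts
instance (encoded_counts : String) (out : List Int) : Decidable (Spec_decode_compressed_rle_counts_py encoded_counts out) := by unfold Spec_decode_compressed_rle_counts_py; infer_instance

-- ===== CLAIM (what is proved, stated in full; the proofs are below) =====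
def Claim_equal_decode_compressed_rle_counts_py : Prop := ∀ (encoded_counts : String), Dom_decode_compressed_rle_counts_py encoded_counts → Pre_decode_compressed_rle_counts_py encoded_counts → Spec_decode_compressed_rle_counts_py encoded_counts (decode_compressed_rle_counts_py encoded_counts)

-- ===== LEMMAS AND PROOFS =====
-- (the ports in fact agree on ALL inputs: on excluded inputs both return the same
-- `[]` default, so the equivalence below is proved unconditionally)

theorem pv_and31 (d : Nat) : d &&& 31 = d % 32 := by
  have := Nat.and_two_pow_sub_one_eq_mod d 5; norm_num at this; omega

theorem pv_and32 (d : Nat) : (d &&& 32 ≠ 0) ↔ ¬ d % 64 < 32 := by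
  have h : d &&& 32 = (d.testBit 5).toNat * 32 := by
    have := Nat.and_two_pow d 5; norm_num at this; exact this
  have h2 : d.testBit 5 = decide (d / 32 % 2 = 1) := by
    have := @Nat.testBit_eq_decide_div_mod_eq 5 d; norm_num at this; exact this
  rw [h, h2]; by_cases hd : d / 32 % 2 = 1 <;> simp [hd] <;> omega

theorem pv_and16 (d : Nat) : (d &&& 16 ≠ 0) ↔ 16 ≤ d % 32 := by
  have h : d &&& 16 = (d.testBit 4).toNat * 16 := by
    have := Nat.and_two_pow d 4; norm_num at this; exact this
  have h2 : d.testBit 4 = decide (d / 16 % 2 = 1) := by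
    have := @Nat.testBit_eq_decide_div_mod_eq 4 d; norm_num at this; exact this
  rw [h, h2]; by_cases hd : d / 16 % 2 = 1 <;> simp [hd] <;> omega

theorem pv_lor_add (v c n : Nat) (h : v < 2 ^ n) : v ||| (c <<< n) = v + c * 2 ^ n := by
  rw [Nat.shiftLeft_eq, Nat.lor_comm, Nat.mul_comm, ← Nat.two_pow_add_eq_or_of_lt h]; ring

-- Proof-side spec: the codes of the first varint group and the remaining chars.
def pvFirstGroup : List Char → Option (List Nat × List Char)
  | [] => none
  | c :: rest =>
    if c.toNat < 48 then none
    else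
      let d := c.toNat - 48
      if d % 64 < 32 then some ([d], rest)
      else (pvFirstGroup rest).map (fun p => (d :: p.1, p.2))

-- Little-endian base-32 value of a group's codes.
def pvLE : List Nat → Nat
  | [] => 0
  | d :: r => d % 32 + 32 * pvLE r

theorem pvFirstGroup_ne_nil : ∀ l g r, pvFirstGroup l = some (g, r) → g ≠ [] := by
  intro l
  induction l with
  | nil => intro g r h; simp [pvFirstGroup] at h
  | cons c t ih =>
    intro g r h
    simp only [pvFirstGroup] at h
    split at h
    · simp at h
    · split at h
      · simp at h; obtain ⟨h1, _⟩ := h; simp [← h1]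
      · simp only [Option.map_eq_some_iff] at h
        obtain ⟨⟨g', r'⟩, _, h2⟩ := h
        cases h2; simp

theorem pvFirstGroup_shape : ∀ l g r, pvFirstGroup l = some (g, r) →
    ∃ pre, l = pre ++ r ∧ (∀ c ∈ pre, 48 ≤ c.toNat) ∧ g = pre.map (fun c => c.toNat - 48) ∧ pre ≠ [] := by
  intro l
  induction l with
  | nil => intro g r h; simp [pvFirstGroup] at h
  | cons c t ih =>
    intro g r h
    simp only [pvFirstGroup] at h
    split at h
    · simp at h
    · rename_i hc
      split at h
      · simp at h; obtain ⟨h1, h2⟩ := h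
        exact ⟨[c], by simp [h2], by intro x hx; simp at hx; subst hx; omega, by simp [← h1], by simp⟩
      · simp only [Option.map_eq_some_iff] at h
        obtain ⟨⟨g', r'⟩, hfg, h2⟩ := h
        obtain ⟨pre, hl, hvalid, hg, _hne⟩ := ih g' r' hfg
        cases h2
        refine ⟨c :: pre, by simp [hl], ?_, by simp [hg], by simp⟩
        intro x hx
        rcases List.mem_cons.mp hx with hx | hx
        · subst hx; omega
        · exact hvalid x hx

-- A's inner loop consumes exactly the first group.
theorem pv_aInner_fg : ∀ (l : List Char) (v sh : Nat), v < 2 ^ (5 * sh) →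
    aInner l v sh =
      match pvFirstGroup l with
      | none => none
      | some (g, rest) => some (v + pvLE g * 2 ^ (5 * sh), sh + g.length, g.getLastD 0 &&& 16, rest) := by
  intro l
  induction l with
  | nil => intro v sh _; simp [aInner, pvFirstGroup]
  | cons c t ih =>
    intro v sh hv
    by_cases hneg : ((c.toNat : Int) - 48) < 0
    · have hc : c.toNat < 48 := by omega
      simp [aInner, pvFirstGroup, hneg, hc]
    · have hc : ¬ c.toNat < 48 := by omega
      simp only [aInner, pvFirstGroup, if_neg hneg, if_neg hc]
      have hd : ((c.toNat : Int) - 48).toNat = c.toNat - 48 := by omega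
      set d := c.toNat - 48 with hdd
      have hval : v ||| ((((c.toNat : Int) - 48).toNat &&& 31) <<< (5 * sh))
          = v + d % 32 * 2 ^ (5 * sh) := by
        rw [hd, pv_and31, pv_lor_add _ _ _ hv]
      by_cases hcont : d &&& 32 ≠ 0
      · have hmod : ¬ d % 64 < 32 := (pv_and32 d).mp hcont
        have hcont' : (((c.toNat : Int) - 48).toNat &&& 32 != 0) = true := by
          rw [hd]; simpa using hcont
        simp only [hval, if_neg hmod, hcont', if_pos]
        have hvlt : v + d % 32 * 2 ^ (5 * sh) < 2 ^ (5 * (sh + 1)) := by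
          have h32 : d % 32 < 32 := Nat.mod_lt _ (by norm_num)
          have he : (2 : Nat) ^ (5 * (sh + 1)) = 2 ^ (5 * sh) * 32 := by ring
          rw [he]; nlinarith [hv, h32, Nat.one_le_two_pow (n := 5 * sh)]
        rw [ih _ _ hvlt]
        cases hfg : pvFirstGroup t with
        | none => simp
        | some p =>
          obtain ⟨g, rest⟩ := p
          have hgne := pvFirstGroup_ne_nil t g rest hfg
          simp only
          refine congrArg some ?_
          refine Prod.ext ?_ (Prod.ext ?_ (Prod.ext ?_ rfl))
          · show v + d % 32 * 2 ^ (5 * sh) + pvLE g * 2 ^ (5 * (sh + 1))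
               = v + pvLE (d :: g) * 2 ^ (5 * sh)
            simp only [pvLE]
            have : (2 : Nat) ^ (5 * (sh + 1)) = 32 * 2 ^ (5 * sh) := by ring
            rw [this]; ring
          · show sh + 1 + g.length = sh + (d :: g).length
            simp; omega
          · show g.getLastD 0 &&& 16 = (d :: g).getLastD 0 &&& 16
            congr 1
            cases g with
            | nil => exact absurd rfl hgne
            | cons x xs => simp [List.getLastD]
      · have hmod : d % 64 < 32 := by
          by_contra hmm; exact hcont ((pv_and32 d).mpr hmm)
        have hcont' : ¬ (((c.toNat : Int) - 48).toNat &&& 32 != 0) = true := by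
          rw [hd]; simpa using fun hh => hcont hh
        simp only [hval, if_pos hmod, if_neg hcont']
        simp [pvLE, hd, List.getLastD]

-- digit table roundtrip: pvDigitVal inverts indexing into pvDigitsB.
theorem pv_digit_rt : ∀ j < 32, pvDigitVal (pvDigitsB.getD j '0') = j := by decide

-- B's string-based group decode equals the signed little-endian value.
theorem pv_parse_LE : ∀ g : List Nat,
    pvParse32 (g.reverse.map (fun c => pvDigitsB.getD (c % 32) '0')) = pvLE g := by
  intro g
  induction g with
  | nil => simp [pvParse32, pvLE]
  | cons d r ih =>
    have hrt : pvDigitVal (pvDigitsB.getD (d % 32) '0') = d % 32 :=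
      pv_digit_rt (d % 32) (Nat.mod_lt _ (by norm_num))
    simp only [pvLE, List.reverse_cons, List.map_append, List.map_cons, List.map_nil,
      pvParse32, List.foldl_append, List.foldl_cons, List.foldl_nil] at *
    rw [ih, hrt]; ring

theorem pv_decodeGroup (g : List Nat) (hg : g ≠ []) :
    bDecodeGroup g = (if g.getLastD 0 &&& 16 ≠ 0 then (pvLE g : Int) - 2 ^ (5 * g.length) else (pvLE g : Int)) := by
  unfold bDecodeGroup
  rw [pv_parse_LE]
  have hpow : (32 : Int) ^ g.length = 2 ^ (5 * g.length) := by
    rw [show (32 : Int) = 2 ^ 5 by norm_num, ← pow_mul]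
  have hsig := pv_and16 (g.getLastD 0)
  by_cases hs : 16 ≤ g.getLastD 0 % 32
  · rw [if_pos hs, if_pos (hsig.mpr hs), hpow]
  · rw [if_neg hs, if_neg (fun hh => hs (hsig.mp hh))]

-- B's splitter agrees with pvFirstGroup on all-valid input.
theorem pv_bSplit_fg : ∀ (l : List Char) (acc : List Nat), l ≠ [] → (∀ c ∈ l, 48 ≤ c.toNat) →
    bSplit (l.map (fun c => c.toNat - 48)) acc =
      match pvFirstGroup l with
      | none => none
      | some (g, rest) => (bSplit (rest.map (fun c => c.toNat - 48)) []).map (fun gs => (acc ++ g) :: gs) := by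
  intro l
  induction l with
  | nil => intro acc h; exact absurd rfl h
  | cons c t ih =>
    intro acc _ hvalid
    have hc : ¬ c.toNat < 48 := by have := hvalid c (by simp); omega
    simp only [pvFirstGroup, if_neg hc, List.map_cons, bSplit]
    set d := c.toNat - 48 with hd
    by_cases hm : d % 64 < 32
    · simp [hm]
    · simp only [if_neg hm]
      cases t with
      | nil => simp [pvFirstGroup, bSplit]
      | cons c' t' =>
        rw [ih (acc ++ [d]) (by simp) (fun x hx => hvalid x (by simp [hx]))]
        cases hfg : pvFirstGroup (c' :: t') with
        | none => simp
        | some p => obtain ⟨g, r⟩ := p; simp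

-- A's interleaved outer loop equals B's staged pipeline (at the Option level).
theorem pv_main : ∀ (l : List Char) (counts : List Int),
    aLoop l counts =
      (if l.any (fun c => c.toNat < 48) then none
       else (bSplit (l.map (fun c => c.toNat - 48)) []).bind
              (fun gs => bConsume (gs.map bDecodeGroup) counts)) := by
  suffices H : ∀ n (l : List Char), l.length ≤ n → ∀ counts,
      aLoop l counts =
        (if l.any (fun c => c.toNat < 48) then none
         else (bSplit (l.map (fun c => c.toNat - 48)) []).bind
                (fun gs => bConsume (gs.map bDecodeGroup) counts)) from
    fun l counts => H l.length l le_rfl counts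
  intro n
  induction n with
  | zero =>
    intro l hl counts
    have : l = [] := List.eq_nil_of_length_eq_zero (Nat.le_zero.mp hl)
    subst this; simp [aLoop, bSplit, bConsume]
  | succ n ih =>
    intro l hl counts
    cases l with
    | nil => simp [aLoop, bSplit, bConsume]
    | cons c t =>
      rw [aLoop, dif_neg (List.cons_ne_nil c t)]
      have hfg0 := pv_aInner_fg (c :: t) 0 0 (by norm_num)
      cases hfg : pvFirstGroup (c :: t) with
      | none =>
        rw [hfg] at hfg0; simp only at hfg0
        rw [hfg0]
        by_cases hv : (c :: t).any (fun c => c.toNat < 48)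
        · simp [hv]
        · have hvalid : ∀ x ∈ c :: t, 48 ≤ x.toNat := by
            intro x hx; have := (List.any_eq_false ..).mp (Bool.not_eq_true _ ▸ hv) x hx
            simp at this; omega
          rw [if_neg hv, pv_bSplit_fg (c :: t) [] (List.cons_ne_nil c t) hvalid, hfg]
          simp
      | some p =>
        obtain ⟨g, rest⟩ := p
        rw [hfg] at hfg0; simp only at hfg0
        simp only [Nat.mul_zero, pow_zero, mul_one, zero_add] at hfg0
        rw [hfg0]
        simp only
        have hgne := pvFirstGroup_ne_nil _ _ _ hfg
        obtain ⟨pre, hlpre, hprevalid, hgpre, hprene⟩ := pvFirstGroup_shape _ _ _ hfg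
        have hrlen : rest.length ≤ n := by
          have h1 : (c :: t).length = pre.length + rest.length := by
            rw [hlpre, List.length_append]
          have h2 : 1 ≤ pre.length := by
            cases pre with | nil => exact absurd rfl hprene | cons _ _ => simp
          simp only [List.length_cons] at hl h1; omega
        have hVdec : bDecodeGroup g
            = (if g.getLastD 0 &&& 16 ≠ 0 then (pvLE g : Int) - 2 ^ (5 * g.length) else (pvLE g : Int)) :=
          pv_decodeGroup g hgne
        set V : Int := if g.getLastD 0 &&& 16 ≠ 0 then (pvLE g : Int) - 2 ^ (5 * g.length) else (pvLE g : Int) with hV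
        set value2 : Int :=
          if counts.length > 1 then V + (PySem.List.pyGet? counts (-2)).getD 0 else V with hv2
        by_cases hv : (c :: t).any (fun c => c.toNat < 48)
        · rw [if_pos hv]
          have hrinv : rest.any (fun c => c.toNat < 48) = true := by
            rcases List.any_eq_true.mp hv with ⟨x, hx, hxlt⟩
            rcases List.mem_append.mp (hlpre ▸ hx) with hx | hx
            · have := hprevalid x hx; simp at hxlt; omega
            · exact List.any_eq_true.mpr ⟨x, hx, hxlt⟩
          by_cases hneg : value2 < 0
          · rw [if_pos hneg]
          · rw [if_neg hneg, ih rest hrlen, if_pos hrinv]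
        · have hvalid : ∀ x ∈ c :: t, 48 ≤ x.toNat := by
            intro x hx; have := (List.any_eq_false ..).mp (Bool.not_eq_true _ ▸ hv) x hx
            simp at this; omega
          have hrvalid : rest.any (fun c => c.toNat < 48) = false := by
            refine (List.any_eq_false ..).mpr ?_
            intro x hx
            have := hvalid x (hlpre ▸ List.mem_append.mpr (Or.inr hx))
            simp; omega
          rw [if_neg hv, pv_bSplit_fg (c :: t) [] (List.cons_ne_nil c t) hvalid, hfg]
          simp only [List.nil_append]
          cases hbs : bSplit (rest.map (fun c => c.toNat - 48)) [] with
          | none =>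
            simp only [Option.map_none, Option.bind_none]
            by_cases hneg : value2 < 0
            · rw [if_pos hneg]
            · rw [if_neg hneg, ih rest hrlen, if_neg (by simp [hrvalid]), hbs]; rfl
          | some gs =>
            simp only [Option.map_some, Option.bind_some, List.map_cons, bConsume, hVdec, ← hv2]
            by_cases hneg : value2 < 0
            · rw [if_pos hneg, if_pos hneg]
            · rw [if_neg hneg, if_neg hneg, ih rest hrlen, if_neg (by simp [hrvalid]), hbs]; rfl

theorem pv_ports_eq (s : String) :
    decode_compressed_rle_counts_py s = decode_compressed_rle_counts_py_alt s := by
  unfold decode_compressed_rle_counts_py decode_compressed_rle_counts_py_alt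
  by_cases h : s = ""
  · simp [h]
  · simp only [if_neg h, pv_main]
    by_cases hv : s.toList.any (fun c => c.toNat < 48)
    · simp [hv]
    · simp [hv]

-- ===== VERDICT (by name: the statement is the Claim_ definition above) =====
theorem decode_compressed_rle_counts_py_spec : Claim_equal_decode_compressed_rle_counts_py := by
  intro s _ _
  unfold Spec_decode_compressed_rle_counts_py
  exact pv_ports_eq s
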